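-- pv_equiv track=rewrite | github.com/take-works-tech/arc-agi2-arc2025 | src/data_systems/generator/input_grid_generator/builders/shape_utils.py | rotate_pixels
-- ===== SOURCE A (Python) =====
-- from typing import List, Dict, Tuple, Optional
--
-- def rotate_pixels(pixels: List[Tuple[int, int]], angle: int) -> List[Tuple[int, int]]:
--     """ピクセルを回転（90度単位、最適化版）
--
--     Args:
--         pixels: ピクセル座標のリスト
--         angle: 回転角度（90, 180, 270）
--
--     Returns:
--         回転後のピクセル座標のリスト（正規化済み）
--     """
--     if angle == 0:
--         return pixels.copy()
--
--     # 90度ごとに回転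
--     result = pixels.copy()
--     for _ in range(angle // 90):
--         result = [(-y, x) for x, y in result]
--
--     # 正規化（最小座標を(0,0)に、最適化: 1回のループでmin/maxを取得）
--     if result:
--         min_x = min_y = float('inf')
--         for x, y in result:
--             if x < min_x:
--                 min_x = x
--             if y < min_y:
--                 min_y = y
--         result = [(x - min_x, y - min_y) for x, y in result]
--
--     return result
-- ===== SOURCE B (Python) =====
-- def rotate_pixels(pixels, angle):
--     if angle == 0:
--         return pixels.copy()
--     # net quarter-turns: negative angles give range(negative) = no rotations in A
--     k = max(angle // 90, 0) % 4
--     if k == 0: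
--         result = [(x, y) for x, y in pixels]
--     elif k == 1:
--         result = [(-y, x) for x, y in pixels]
--     elif k == 2:
--         result = [(-x, -y) for x, y in pixels]
--     else:
--         result = [(y, -x) for x, y in pixels]
--     if result:
--         min_x = min(x for x, _ in result)
--         min_y = min(y for _, y in result)
--         result = [(x - min_x, y - min_y) for x, y in result]
--     return result
-- ===== Notes on version B (the rewrite author's own statement) =====
-- stated objective: faster
-- what changed: Instead of rebuilding the list once per 90 degrees (angle//90 iterations) and a manual running-min loop, B reduces the angle to k = max(angle//90,0) % 4 net quarter-turns, applies the closed-form map for that k in one pass, and normalizes with builtin min over each coordinate.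
import Mathlib
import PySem

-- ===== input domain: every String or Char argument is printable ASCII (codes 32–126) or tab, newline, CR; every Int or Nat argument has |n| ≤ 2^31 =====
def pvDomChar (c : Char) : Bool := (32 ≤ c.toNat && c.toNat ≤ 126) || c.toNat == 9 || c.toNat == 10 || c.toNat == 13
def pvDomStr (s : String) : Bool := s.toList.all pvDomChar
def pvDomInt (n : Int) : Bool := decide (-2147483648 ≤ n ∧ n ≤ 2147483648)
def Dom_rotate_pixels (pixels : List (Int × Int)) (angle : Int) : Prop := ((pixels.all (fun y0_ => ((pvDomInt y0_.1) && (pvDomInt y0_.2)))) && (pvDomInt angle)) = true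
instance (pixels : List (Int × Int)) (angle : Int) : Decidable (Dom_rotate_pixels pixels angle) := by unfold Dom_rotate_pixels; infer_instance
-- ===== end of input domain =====

-- ===== PORT A =====
-- B replaces A's repeated per-90-degree list rebuilding with a single closed-form
-- quarter-turn map and builtin mins (objective: faster for large angles).
def pvRotOnce (r : List (Int × Int)) : List (Int × Int) := r.map fun p => (-p.2, p.1)

-- 'for _ in range(angle // 90)': range of a negative count is empty, matched by Int.toNat
def pvIterRot : Nat → List (Int × Int) → List (Int × Int)
  | 0, r => r
  | n + 1, r => pvIterRot n (pvRotOnce r)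

-- A's normalization block: the single running-min loop, then the shift.
-- A starts min_x/min_y at float('inf'); since the loop only runs on a nonempty list,
-- folding the whole list from the head's coordinates is exact (the comparison with inf always updates).
def pvNormA (result : List (Int × Int)) : List (Int × Int) :=
  match result with
  | [] => result
  | p :: _ =>
    let m := result.foldl
      (fun (m : Int × Int) q =>
        ((if q.1 < m.1 then q.1 else m.1), (if q.2 < m.2 then q.2 else m.2)))
      (p.1, p.2)
    result.map fun q => (q.1 - m.1, q.2 - m.2)

def rotate_pixels (pixels : List (Int × Int)) (angle : Int) : List (Int × Int) :=
  if angle = 0 then pixels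
  else pvNormA (pvIterRot (PySem.Int.floordiv angle 90).toNat pixels)

-- ===== PORT B =====
-- the k-way branch of Source B
def pvQuarter (k : Int) (pixels : List (Int × Int)) : List (Int × Int) :=
  if k = 0 then pixels.map fun p => (p.1, p.2)
  else if k = 1 then pixels.map fun p => (-p.2, p.1)
  else if k = 2 then pixels.map fun p => (-p.1, -p.2)
  else pixels.map fun p => (p.2, -p.1)

-- Source B's normalization: builtin min over each coordinate, then the shift
def pvNormB (result : List (Int × Int)) : List (Int × Int) :=
  if result ≠ [] then
    match PySem.List.min? (result.map Prod.fst) (fun x => x),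
          PySem.List.min? (result.map Prod.snd) (fun y => y) with
    | some mx, some my => result.map fun p => (p.1 - mx, p.2 - my)
    | _, _ => result
  else result

def rotate_pixels_alt (pixels : List (Int × Int)) (angle : Int) : List (Int × Int) :=
  if angle = 0 then pixels
  else pvNormB (pvQuarter (PySem.Int.mod (max (PySem.Int.floordiv angle 90) 0) 4) pixels)

-- ===== PRECONDITION & SPEC =====
def Spec_rotate_pixels (pixels : List (Int × Int)) (angle : Int) (out : List (Int × Int)) : Prop := out = rotate_pixels_alt pixels angle
instance (pixels : List (Int × Int)) (angle : Int) (out : List (Int × Int)) : Decidable (Spec_rotate_pixels pixels angle out) := by unfold Spec_rotate_pixels; infer_instance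

-- ===== CLAIM (what is proved, stated in full; the proofs are below) =====
def Claim_equal_rotate_pixels : Prop := ∀ (pixels : List (Int × Int)) (angle : Int), Dom_rotate_pixels pixels angle → Spec_rotate_pixels pixels angle (rotate_pixels pixels angle)

-- ===== LEMMAS AND PROOFS =====

theorem pvRotOnce_four (r : List (Int × Int)) :
    pvRotOnce (pvRotOnce (pvRotOnce (pvRotOnce r))) = r := by
  simp [pvRotOnce, List.map_map, Function.comp_def]

theorem pvIterRot_mod (n : Nat) (r : List (Int × Int)) :
    pvIterRot n r = pvIterRot (n % 4) r := by
  induction n using Nat.strong_induction_on generalizing r with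
  | _ n ih =>
    match n, ih with
    | 0, _ => rfl
    | 1, _ => rfl
    | 2, _ => rfl
    | 3, _ => rfl
    | (m + 4), ih =>
      have h4 : pvIterRot (m + 4) r = pvIterRot m r := by
        show pvIterRot m (pvRotOnce (pvRotOnce (pvRotOnce (pvRotOnce r)))) = pvIterRot m r
        rw [pvRotOnce_four]
      rw [h4, ih m (by omega)]
      congr 1
      omega

theorem foldl_pair_minstep (l : List (Int × Int)) (a b : Int) :
    l.foldl (fun (m : Int × Int) q =>
        ((if q.1 < m.1 then q.1 else m.1), (if q.2 < m.2 then q.2 else m.2))) (a, b)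
    = ((l.map Prod.fst).foldl min a, (l.map Prod.snd).foldl min b) := by
  induction l generalizing a b with
  | nil => rfl
  | cons h t ih =>
    simp only [List.foldl_cons, List.map_cons, ih]
    congr 1 <;> congr 1 <;> omega

theorem norm_eq (result : List (Int × Int)) : pvNormA result = pvNormB result := by
  match result with
  | [] => rfl
  | p :: t =>
    simp only [pvNormA, pvNormB, ne_eq, reduceCtorEq, not_false_eq_true, if_true,
      List.map_cons, PySem.List.min?_id_cons, List.foldl_cons, foldl_pair_minstep,
      lt_irrefl, ite_self]

theorem quarter_eq (m : Nat) (pixels : List (Int × Int)) :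
    pvQuarter ((m % 4 : Nat) : Int) pixels = pvIterRot (m % 4) pixels := by
  have h : m % 4 = 0 ∨ m % 4 = 1 ∨ m % 4 = 2 ∨ m % 4 = 3 := by omega
  rcases h with h | h | h | h <;> rw [h] <;>
    simp [pvQuarter, pvIterRot, pvRotOnce, List.map_map, Function.comp_def]

-- ===== VERDICT (by name: the statement is the Claim_ definition above) =====
theorem rotate_pixels_spec : Claim_equal_rotate_pixels := by
  intro pixels angle _
  unfold Spec_rotate_pixels rotate_pixels rotate_pixels_alt
  by_cases h0 : angle = 0
  · simp [h0]
  · simp only [h0, if_false]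
    have hmax : max (PySem.Int.floordiv angle 90) 0
        = ((PySem.Int.floordiv angle 90).toNat : Int) := Int.toNat_eq_max _ ▸ rfl
    set n := (PySem.Int.floordiv angle 90).toNat with hn
    have hk : PySem.Int.mod (max (PySem.Int.floordiv angle 90) 0) 4 = ((n % 4 : Nat) : Int) := by
      rw [hmax]
      exact_mod_cast PySem.Int.mod_natCast n 4
    rw [hk, quarter_eq, pvIterRot_mod, norm_eq]
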